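-- pv_equiv track=rewrite | github.com/hegingas/lottory | src/lottery/scoring.py | ac_value
-- ===== SOURCE A (Python) =====
-- def ac_value(nums: list[int]) -> int:
--     nums = sorted(nums)
--     n = len(nums)
--     diffs: set[int] = set()
--     for i in range(n):
--         for j in range(i + 1, n):
--             diffs.add(abs(nums[j] - nums[i]))
--     return len(diffs) - (n - 1)
-- ===== SOURCE B (Python) =====
-- def ac_value(nums: list[int]) -> int:
--     s = sorted(nums)
--
--     def diffs(lo: int, hi: int) -> set:
--         # distinct differences s[j] - s[i] for lo <= i < j < hi
--         if hi - lo < 2: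
--             return set()
--         mid = (lo + hi) // 2
--         d = diffs(lo, mid)
--         right = s[mid:hi]
--         for a in s[lo:mid]:
--             d.update(b - a for b in right)
--         d |= diffs(mid, hi)
--         return d
--
--     return len(diffs(0, len(s))) - (len(nums) - 1)
-- ===== Notes on version B (the rewrite author's own statement) =====
-- stated objective: alternative
-- what changed: B replaces A's nested index loops over one mutated accumulator by a divide-and-conquer on the sorted array: differences inside a range are the differences of its two halves plus the cross differences right-minus-left (no abs needed once sorted), the three sets merged by set union.
import Mathlib
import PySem

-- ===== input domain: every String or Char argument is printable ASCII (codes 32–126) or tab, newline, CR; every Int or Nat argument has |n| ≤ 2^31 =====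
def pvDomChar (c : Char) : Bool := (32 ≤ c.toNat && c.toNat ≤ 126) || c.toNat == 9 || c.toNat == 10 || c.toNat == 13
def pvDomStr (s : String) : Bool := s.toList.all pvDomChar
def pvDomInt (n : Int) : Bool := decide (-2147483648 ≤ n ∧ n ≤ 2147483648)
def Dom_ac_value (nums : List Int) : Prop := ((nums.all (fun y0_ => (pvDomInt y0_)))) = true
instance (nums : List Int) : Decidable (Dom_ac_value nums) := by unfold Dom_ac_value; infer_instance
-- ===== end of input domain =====

-- B replaces A's nested index loops over one mutated accumulator by a divide-and-conquer on
-- the sorted array: half-diffs unioned with the cross differences (objective: alternative).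

-- ===== PORT A =====
def ac_value (nums : List Int) : Int :=
  let s := PySem.List.sorted nums (fun x => x) false
  let n : Int := s.length
  let diffs : PySem.Set Int :=
    (PySem.List.pyRange 0 n 1).foldl (fun d i =>
      (PySem.List.pyRange (i + 1) n 1).foldl (fun d j =>
        PySem.Set.add d (|PySem.List.pyGetD s j 0 - PySem.List.pyGetD s i 0|)) d)
      PySem.Set.empty
  (diffs.length : Int) - (n - 1)

-- ===== PORT B =====
-- diffs(lo, hi): distinct differences s[j] - s[i] for lo <= i < j < hi
def bDiffs (s : List Int) (lo hi : Nat) : PySem.Set Int :=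
  if hi - lo < 2 then PySem.Set.empty
  else
    let mid := (lo + hi) / 2
    let d := bDiffs s lo mid
    let right := PySem.List.slice s (some (mid : Int)) (some (hi : Int))
    let d := (PySem.List.slice s (some (lo : Int)) (some (mid : Int))).foldl
      (fun d a => PySem.Set.update d (right.map (fun b => b - a))) d
    PySem.Set.union d (bDiffs s mid hi)
  termination_by hi - lo
  decreasing_by all_goals omega

def ac_value_alt (nums : List Int) : Int :=
  let s := PySem.List.sorted nums (fun x => x) false
  ((bDiffs s 0 s.length).length : Int) - ((nums.length : Int) - 1)

-- ===== PRECONDITION & SPEC =====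
def Spec_ac_value (nums : List Int) (out : Int) : Prop := out = ac_value_alt nums
instance (nums : List Int) (out : Int) : Decidable (Spec_ac_value nums out) := by unfold Spec_ac_value; infer_instance

-- ===== CLAIM =====
def Claim_equal_ac_value : Prop := ∀ (nums : List Int), Dom_ac_value nums → Spec_ac_value nums (ac_value nums)

-- ===== LEMMAS AND PROOFS =====

theorem nodup_foldl_add {α β : Type} [BEq α] [LawfulBEq α] (l : List β) (f : β → α)
    (s : PySem.Set α) (hs : s.Nodup) :
    (l.foldl (fun s b => PySem.Set.add s (f b)) s).Nodup := by
  induction l generalizing s with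
  | nil => exact hs
  | cons b t ih => exact ih _ (PySem.Set.nodup_add _ _ hs)

-- membership in A's nested fold
theorem mem_nested_fold (outer : List Int) (inner : Int → List Int) (f : Int → Int → Int)
    (d0 : PySem.Set Int) (x : Int) :
    x ∈ (outer.foldl (fun d i => (inner i).foldl (fun d j => PySem.Set.add d (f i j)) d) d0) ↔
      x ∈ d0 ∨ ∃ i ∈ outer, ∃ j ∈ inner i, x = f i j := by
  induction outer generalizing d0 with
  | nil => simp
  | cons i t ih =>
    simp only [List.foldl_cons, ih, PySem.Set.mem_foldl_add]
    constructor
    · rintro ((h | ⟨j, hj, rfl⟩) | ⟨p, hp, q, hq, rfl⟩)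
      · exact Or.inl h
      · exact Or.inr ⟨i, List.mem_cons_self .., j, hj, rfl⟩
      · exact Or.inr ⟨p, List.mem_cons_of_mem _ hp, q, hq, rfl⟩
    · rintro (h | ⟨p, hp, q, hq, rfl⟩)
      · exact Or.inl (Or.inl h)
      · rcases List.mem_cons.mp hp with rfl | hp
        · exact Or.inl (Or.inr ⟨q, hq, rfl⟩)
        · exact Or.inr ⟨p, hp, q, hq, rfl⟩

theorem nodup_nested_fold (outer : List Int) (inner : Int → List Int) (f : Int → Int → Int)
    (d0 : PySem.Set Int) (h : d0.Nodup) :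
    (outer.foldl (fun d i => (inner i).foldl (fun d j => PySem.Set.add d (f i j)) d) d0).Nodup := by
  induction outer generalizing d0 with
  | nil => exact h
  | cons i t ih => exact ih _ (nodup_foldl_add _ _ _ h)

-- proof-side name for A's difference set
def Adiffs (nums : List Int) : PySem.Set Int :=
  (PySem.List.pyRange 0 ((PySem.List.sorted nums (fun x => x) false).length : Int) 1).foldl
    (fun d i =>
      (PySem.List.pyRange (i + 1) ((PySem.List.sorted nums (fun x => x) false).length : Int) 1).foldl
        (fun d j =>
          PySem.Set.add d (|PySem.List.pyGetD (PySem.List.sorted nums (fun x => x) false) j 0 -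
            PySem.List.pyGetD (PySem.List.sorted nums (fun x => x) false) i 0|)) d)
    PySem.Set.empty

theorem ac_value_eq (nums : List Int) :
    ac_value nums = ((Adiffs nums).length : Int) - ((nums.length : Int) - 1) := by
  show ((Adiffs nums).length : Int) -
      (((PySem.List.sorted nums (fun x => x) false).length : Int) - 1) = _
  rw [PySem.List.length_sorted]

-- index-pair membership of the nested fold, for a monotone list (abs dropped)
theorem mem_Afold (s : List Int)
    (hmono : ∀ i j : Nat, i ≤ j → j < s.length → s.getD i 0 ≤ s.getD j 0) (x : Int) :
    x ∈ ((PySem.List.pyRange 0 (s.length : Int) 1).foldl (fun d i =>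
      (PySem.List.pyRange (i + 1) (s.length : Int) 1).foldl (fun d j =>
        PySem.Set.add d (|PySem.List.pyGetD s j 0 - PySem.List.pyGetD s i 0|)) d)
      PySem.Set.empty) ↔
      ∃ i j : Nat, i < j ∧ j < s.length ∧ x = s.getD j 0 - s.getD i 0 := by
  rw [mem_nested_fold]
  constructor
  · rintro (h | ⟨i, hi, j, hj, rfl⟩)
    · simp [PySem.Set.empty] at h
    · rw [PySem.List.mem_pyRange_one] at hi hj
      refine ⟨i.toNat, j.toNat, by omega, by omega, ?_⟩
      have hm := hmono i.toNat j.toNat (by omega) (by omega)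
      rw [PySem.List.pyGetD_eq_getElem s 0 (by omega) (by omega),
        PySem.List.pyGetD_eq_getElem s 0 (by omega) (by omega)]
      rw [List.getD_eq_getElem s 0 (by omega), List.getD_eq_getElem s 0 (by omega)] at hm ⊢
      rw [abs_of_nonneg (by omega)]
  · rintro ⟨i, j, hij, hj, rfl⟩
    refine Or.inr ⟨(i : Int), ?_, (j : Int), ?_, ?_⟩
    · rw [PySem.List.mem_pyRange_one]; omega
    · rw [PySem.List.mem_pyRange_one]; omega
    · have hm := hmono i j (by omega) hj
      rw [PySem.List.pyGetD_natCast, PySem.List.pyGetD_natCast,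
        abs_of_nonneg (by omega : (0:Int) ≤ s.getD j 0 - s.getD i 0)]

theorem mem_Adiffs (nums : List Int) (x : Int) :
    x ∈ Adiffs nums ↔
      ∃ i j : Nat, i < j ∧ j < (PySem.List.sorted nums (fun x => x) false).length ∧
        x = (PySem.List.sorted nums (fun x => x) false).getD j 0 -
            (PySem.List.sorted nums (fun x => x) false).getD i 0 := by
  refine mem_Afold (PySem.List.sorted nums (fun x => x) false) ?_ x
  intro i j hij hj
  rw [List.getD_eq_getElem _ 0 hj, List.getD_eq_getElem _ 0 (by omega)]
  exact PySem.List.sorted_id_getElem_mono nums hij hj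

theorem nodup_Adiffs (nums : List Int) : (Adiffs nums).Nodup :=
  nodup_nested_fold _ _ _ _ List.nodup_nil

-- membership and Nodup of a foldl of Set.update
theorem mem_foldl_update (l : List Int) (f : Int → List Int) (d : PySem.Set Int) (x : Int) :
    x ∈ l.foldl (fun d a => PySem.Set.update d (f a)) d ↔ x ∈ d ∨ ∃ a ∈ l, x ∈ f a := by
  induction l generalizing d with
  | nil => simp
  | cons a t ih =>
    simp only [List.foldl_cons, ih, PySem.Set.mem_update]
    constructor
    · rintro ((h | h) | ⟨b, hb, h⟩)
      · exact Or.inl h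
      · exact Or.inr ⟨a, List.mem_cons_self .., h⟩
      · exact Or.inr ⟨b, List.mem_cons_of_mem _ hb, h⟩
    · rintro (h | ⟨b, hb, h⟩)
      · exact Or.inl (Or.inl h)
      · rcases List.mem_cons.mp hb with rfl | hb
        · exact Or.inl (Or.inr h)
        · exact Or.inr ⟨b, hb, h⟩

theorem nodup_foldl_update (l : List Int) (f : Int → List Int) (d : PySem.Set Int)
    (hd : d.Nodup) : (l.foldl (fun d a => PySem.Set.update d (f a)) d).Nodup := by
  induction l generalizing d with
  | nil => exact hd
  | cons a t ih => exact ih _ (PySem.Set.nodup_update _ _ hd)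

-- the slice s[lo:hi] with Nat bounds, elementwise
theorem mem_slice_nat (s : List Int) (lo hi : Nat) (hhi : hi ≤ s.length) (a : Int) :
    a ∈ PySem.List.slice s (some (lo : Int)) (some (hi : Int)) ↔
      ∃ i : Nat, lo ≤ i ∧ i < hi ∧ a = s.getD i 0 := by
  rw [PySem.List.slice_toNat s (by omega) (by omega)]
  simp only [Int.toNat_natCast]
  constructor
  · intro h
    obtain ⟨k, hk, rfl⟩ := List.mem_iff_getElem.mp h
    have hklen : k < hi - lo ∧ lo + k < s.length := by
      have := hk
      simp only [List.length_take, List.length_drop] at this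
      omega
    refine ⟨lo + k, by omega, by omega, ?_⟩
    rw [List.getElem_take, List.getElem_drop, List.getD_eq_getElem s 0 (by omega)]
  · rintro ⟨i, hlo, hhi', rfl⟩
    rw [List.getD_eq_getElem s 0 (by omega)]
    refine List.mem_iff_getElem.mpr ⟨i - lo, ?_, ?_⟩
    · simp only [List.length_take, List.length_drop]; omega
    · rw [List.getElem_take, List.getElem_drop]
      congr 1
      omega

theorem nodup_bDiffs_aux (s : List Int) (n lo hi : Nat) (hn : hi - lo ≤ n) :
    (bDiffs s lo hi).Nodup := by
  induction n generalizing lo hi with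
  | zero => rw [bDiffs, if_pos (by omega)]; exact List.nodup_nil
  | succ n ih =>
    rw [bDiffs]
    split_ifs with h
    · exact List.nodup_nil
    · exact PySem.Set.nodup_union _ _
        (nodup_foldl_update _ _ _ (ih lo ((lo + hi) / 2) (by omega)))

theorem nodup_bDiffs (s : List Int) (lo hi : Nat) : (bDiffs s lo hi).Nodup :=
  nodup_bDiffs_aux s (hi - lo) lo hi (le_refl _)

theorem mem_bDiffs_aux (s : List Int) (n lo hi : Nat) (hn : hi - lo ≤ n)
    (hhi : hi ≤ s.length) (x : Int) :
    x ∈ bDiffs s lo hi ↔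
      ∃ i j : Nat, lo ≤ i ∧ i < j ∧ j < hi ∧ x = s.getD j 0 - s.getD i 0 := by
  induction n generalizing lo hi with
  | zero =>
    rw [bDiffs, if_pos (by omega)]
    constructor
    · intro h'; simp [PySem.Set.empty] at h'
    · rintro ⟨i, j, h1, h2, h3, _⟩; omega
  | succ n ih =>
    rw [bDiffs]
    split_ifs with h
    · constructor
      · intro h'; simp [PySem.Set.empty] at h'
      · rintro ⟨i, j, h1, h2, h3, _⟩; omega
    · rw [PySem.Set.mem_union, mem_foldl_update,
        ih lo ((lo + hi) / 2) (by omega) (by omega),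
        ih ((lo + hi) / 2) hi (by omega) hhi]
      constructor
      · rintro ((⟨i, j, h1, h2', h3, rfl⟩ | ⟨a, ha, hx⟩) | ⟨i, j, h1, h2', h3, rfl⟩)
        · exact ⟨i, j, h1, h2', by omega, rfl⟩
        · rw [mem_slice_nat s lo _ (by omega)] at ha
          obtain ⟨i, hi1, hi2, rfl⟩ := ha
          rw [List.mem_map] at hx
          obtain ⟨b, hb, rfl⟩ := hx
          rw [mem_slice_nat s _ hi hhi] at hb
          obtain ⟨j, hj1, hj2, rfl⟩ := hb
          exact ⟨i, j, hi1, by omega, hj2, rfl⟩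
        · exact ⟨i, j, by omega, h2', h3, rfl⟩
      · rintro ⟨i, j, h1, hij, h3, rfl⟩
        by_cases hjm : j < (lo + hi) / 2
        · exact Or.inl (Or.inl ⟨i, j, h1, hij, hjm, rfl⟩)
        · by_cases him : (lo + hi) / 2 ≤ i
          · exact Or.inr ⟨i, j, him, hij, h3, rfl⟩
          · refine Or.inl (Or.inr ⟨s.getD i 0, ?_, ?_⟩)
            · rw [mem_slice_nat s lo _ (by omega)]
              exact ⟨i, h1, by omega, rfl⟩
            · rw [List.mem_map]
              refine ⟨s.getD j 0, ?_, rfl⟩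
              rw [mem_slice_nat s _ hi hhi]
              exact ⟨j, by omega, h3, rfl⟩

theorem mem_bDiffs (s : List Int) (lo hi : Nat) (hhi : hi ≤ s.length) (x : Int) :
    x ∈ bDiffs s lo hi ↔
      ∃ i j : Nat, lo ≤ i ∧ i < j ∧ j < hi ∧ x = s.getD j 0 - s.getD i 0 :=
  mem_bDiffs_aux s (hi - lo) lo hi (le_refl _) hhi x

theorem length_eq (nums : List Int) :
    (Adiffs nums).length =
      (bDiffs (PySem.List.sorted nums (fun x => x) false) 0
        (PySem.List.sorted nums (fun x => x) false).length).length := by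
  refine List.Perm.length_eq ?_
  rw [List.perm_ext_iff_of_nodup (nodup_Adiffs nums) (nodup_bDiffs _ _ _)]
  intro x
  rw [mem_Adiffs, mem_bDiffs _ _ _ (le_refl _)]
  constructor
  · rintro ⟨i, j, hij, hj, rfl⟩
    exact ⟨i, j, Nat.zero_le i, hij, hj, rfl⟩
  · rintro ⟨i, j, _, hij, hj, rfl⟩
    exact ⟨i, j, hij, hj, rfl⟩

-- ===== VERDICT =====
theorem ac_value_spec : Claim_equal_ac_value := by
  intro nums _
  show ac_value nums = ac_value_alt nums
  rw [ac_value_eq, ac_value_alt, length_eq]
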